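-- pv_equiv track=rewrite | github.com/Y0ngg4n/metallb-dyndns | main.py | getIPv6Interface
-- ===== SOURCE A (Python) =====
-- def getIPv6Interface(ipv6Addr, interfaceLen):
--     interface = ""
--     curPrefixLen = 0
--     ipv6Parts = ipv6Addr.split(":")
--     for part in ipv6Parts:
--         if curPrefixLen < 256 - interfaceLen:
--             curPrefixLen += 32
--             continue
--         if not interface == "":  # if it's not empty
--             interface = interface + ":"
--         interface = interface + part
--         curPrefixLen += 32
--         if int(curPrefixLen) >= int(256):
--             return interface
--     return interface
-- ===== SOURCE B (Python) =====
-- def getIPv6Interface(ipv6Addr, interfaceLen):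
--     parts = ipv6Addr.split(":")
--     # each group covers 32 prefix bits; drop the leading groups of the prefix
--     skip = max(0, -(-(256 - interfaceLen) // 32))
--     tail = parts[skip:8]
--     # groups emptied by '::' compression at the front contribute no separator
--     while tail and tail[0] == "":
--         tail = tail[1:]
--     return ":".join(tail)
-- ===== Notes on version B (the rewrite author's own statement) =====
-- stated objective: simpler
-- what changed: Replaces A's per-group counter loop with running prefix-length and conditional separator by a closed-form skip index (ceiling division), a slice of groups [skip:8], dropping the leading empty groups, and one join.
-- intended difference: On malformed addresses with more groups than the prefix spans (only possible when interfaceLen < 32, where the interface within the 8 groups is empty), A returns the single group just past the prefix (e.g. '8' for ('0:1:2:3:4:5:6:7:8', 0)) while B returns the intended empty interface ''. — e.g. on getIPv6Interface("0:1:2:3:4:5:6:7:8", 0): A returns "8", B returns ""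
import Mathlib
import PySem

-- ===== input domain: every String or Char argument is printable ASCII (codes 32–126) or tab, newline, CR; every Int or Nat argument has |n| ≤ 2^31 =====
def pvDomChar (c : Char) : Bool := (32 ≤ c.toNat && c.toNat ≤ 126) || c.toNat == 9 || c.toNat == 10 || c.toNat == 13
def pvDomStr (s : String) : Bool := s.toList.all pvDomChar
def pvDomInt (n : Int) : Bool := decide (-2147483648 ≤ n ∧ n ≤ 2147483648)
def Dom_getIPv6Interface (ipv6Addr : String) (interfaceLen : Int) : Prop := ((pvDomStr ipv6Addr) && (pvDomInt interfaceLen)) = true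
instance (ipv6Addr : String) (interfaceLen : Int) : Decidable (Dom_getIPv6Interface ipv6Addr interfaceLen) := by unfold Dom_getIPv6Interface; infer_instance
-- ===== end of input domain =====

-- B replaces A's per-group counter loop by a closed-form skip index plus slice/join (objective: simpler);
-- outside the D_ region below the two agree, inside it B returns the intended empty interface.


-- ===== PORT A =====
-- the for-loop over the parts, with its two accumulators and the early return
def getIPv6Loop (interfaceLen : Int) : List String → String → Int → String
  | [], interface, _ => interface
  | part :: rest, interface, curPrefixLen =>
    if curPrefixLen < 256 - interfaceLen then
      getIPv6Loop interfaceLen rest interface (curPrefixLen + 32)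
    else
      let interface1 := if ¬ (interface = "") then interface ++ ":" else interface
      let interface2 := interface1 ++ part
      let curPrefixLen2 := curPrefixLen + 32
      if curPrefixLen2 ≥ 256 then interface2
      else getIPv6Loop interfaceLen rest interface2 curPrefixLen2

def getIPv6Interface (ipv6Addr : String) (interfaceLen : Int) : String :=
  -- ':' is a nonempty separator, so Python's split never raises; getD [] only totalises
  getIPv6Loop interfaceLen ((PySem.Str.split? ipv6Addr ":").getD []) "" 0

-- ===== PORT B =====
-- the 'while tail and tail[0] == "": tail = tail[1:]' loop of Source B
def getIPv6Trim : List String → List String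
  | [] => []
  | p :: rest => if p == "" then getIPv6Trim rest else p :: rest

def getIPv6Interface_alt (ipv6Addr : String) (interfaceLen : Int) : String :=
  let parts := (PySem.Str.split? ipv6Addr ":").getD []
  let skip := max 0 (-(PySem.Int.floordiv (-(256 - interfaceLen)) 32))
  let tail := PySem.List.slice parts (some skip) (some 8)
  PySem.Str.join ":" (getIPv6Trim tail)

-- ===== PRECONDITION & SPEC =====
-- On malformed addresses with more groups than the prefix itself spans — possible only when
-- interfaceLen < 32, so the interface within the first 8 groups is empty — A returns the lone
-- group just past the prefix while B returns the intended empty interface "".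
def D_getIPv6Interface (ipv6Addr : String) (interfaceLen : Int) : Prop :=
  interfaceLen < 32 ∧
  ((PySem.Str.split? ipv6Addr ":").getD []).getD ((287 - interfaceLen) / 32).toNat "" ≠ ""
instance (ipv6Addr : String) (interfaceLen : Int) : Decidable (D_getIPv6Interface ipv6Addr interfaceLen) := by unfold D_getIPv6Interface; infer_instance

def Spec_getIPv6Interface (ipv6Addr : String) (interfaceLen : Int) (out : String) : Prop := ¬ D_getIPv6Interface ipv6Addr interfaceLen → out = getIPv6Interface_alt ipv6Addr interfaceLen
instance (ipv6Addr : String) (interfaceLen : Int) (out : String) : Decidable (Spec_getIPv6Interface ipv6Addr interfaceLen out) := by unfold Spec_getIPv6Interface; infer_instance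

def pvDiffWitness_getIPv6Interface : String × Int := ("0:1:2:3:4:5:6:7:8", 0)
def pvDiffWitnessOut_getIPv6Interface : String × String := ("8", "")

-- ===== CLAIM (what is proved, stated in full; the proofs are below) =====
def Claim_unchanged_getIPv6Interface : Prop := ∀ (ipv6Addr : String) (interfaceLen : Int), Dom_getIPv6Interface ipv6Addr interfaceLen → Spec_getIPv6Interface ipv6Addr interfaceLen (getIPv6Interface ipv6Addr interfaceLen)
def Claim_changed_getIPv6Interface : Prop := Dom_getIPv6Interface (pvDiffWitness_getIPv6Interface.1) (pvDiffWitness_getIPv6Interface.2) ∧ D_getIPv6Interface (pvDiffWitness_getIPv6Interface.1) (pvDiffWitness_getIPv6Interface.2) ∧ getIPv6Interface (pvDiffWitness_getIPv6Interface.1) (pvDiffWitness_getIPv6Interface.2) = pvDiffWitnessOut_getIPv6Interface.1 ∧ getIPv6Interface_alt (pvDiffWitness_getIPv6Interface.1) (pvDiffWitness_getIPv6Interface.2) = pvDiffWitnessOut_getIPv6Interface.2 ∧ pvDiffWitnessOut_getIPv6Interface.1 ≠ pvDiffWitnessOut_getIPv6Interface.2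
def Claim_exact_getIPv6Interface : Prop := ∀ (ipv6Addr : String) (interfaceLen : Int), Dom_getIPv6Interface ipv6Addr interfaceLen → D_getIPv6Interface ipv6Addr interfaceLen → getIPv6Interface ipv6Addr interfaceLen ≠ getIPv6Interface_alt ipv6Addr interfaceLen

-- ===== LEMMAS AND PROOFS =====

-- the number of leading groups the loop skips, as B computes it
def ipv6Skip (L : Int) : Int := max 0 (-(PySem.Int.floordiv (-(256 - L)) 32))

lemma ipv6Skip_nonneg (L : Int) : 0 ≤ ipv6Skip L := le_max_left _ _

-- the loop's skip test at step k is exactly "k below the closed-form skip index"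
lemma ipv6Skip_iff (L : Int) (k : Nat) : 32 * (k : Int) < 256 - L ↔ (k : Int) < ipv6Skip L := by
  unfold ipv6Skip
  rw [PySem.Int.floordiv_eq_ediv_of_pos (by norm_num : (0:Int) < 32)]
  omega

lemma ipv6Skip_toNat_iff (L : Int) (k : Nat) : 32 * (k : Int) < 256 - L ↔ k < (ipv6Skip L).toNat := by
  rw [ipv6Skip_iff]
  omega

-- for a positive skip, B's closed form agrees with the index used by D_
lemma ipv6Skip_eq_D (L : Int) (h : 0 < ipv6Skip L) : ipv6Skip L = (287 - L) / 32 := by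
  unfold ipv6Skip at *
  rw [PySem.Int.floordiv_eq_ediv_of_pos (by norm_num : (0:Int) < 32)] at *
  omega

lemma string_append_ne_empty (a q : String) : a ++ ":" ++ q ≠ "" := by
  intro h
  have := congrArg String.toList h
  simp at this

lemma joinFold (l : List String) (a b : String) :
    l.foldl (fun x y => x ++ ":" ++ y) (a ++ b) = a ++ l.foldl (fun x y => x ++ ":" ++ y) b := by
  induction l generalizing b with
  | nil => rfl
  | cons q l ih =>
    simp only [List.foldl_cons]
    have ha : (a ++ b) ++ ":" ++ q = a ++ (b ++ ":" ++ q) := by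
      simp [String.append_assoc]
    rw [ha]
    exact ih (b ++ ":" ++ q)

lemma strJoin_singleton (p : String) : PySem.Str.join ":" [p] = p := by
  rw [← String.toList_inj, PySem.Str.toList_join]
  simp [PySem.Chars.join_singleton]

lemma strJoin_cons_cons (p q : String) (l : List String) :
    PySem.Str.join ":" (p :: q :: l) = p ++ ":" ++ PySem.Str.join ":" (q :: l) := by
  rw [← String.toList_inj, PySem.Str.toList_join]
  simp [PySem.Chars.join_cons_cons, PySem.Str.toList_join]

lemma joinCons (l : List String) (p : String) :
    PySem.Str.join ":" (p :: l) = l.foldl (fun x y => x ++ ":" ++ y) p := by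
  induction l generalizing p with
  | nil => exact strJoin_singleton p
  | cons q l ih =>
    rw [strJoin_cons_cons]
    simp only [List.foldl_cons]
    rw [joinFold l (p ++ ":") q, ih]

-- collect phase with a nonempty accumulator: pure concatenation of the next groups up to the 8th
lemma loop_collect_ne (L : Int) (parts : List String) (k : Nat) (acc : String)
    (h8 : k < 8) (hge : 256 - L ≤ 32 * (k : Int)) (hacc : acc ≠ "") :
    getIPv6Loop L parts acc (32 * (k : Int)) =
      (parts.take (8 - k)).foldl (fun x y => x ++ ":" ++ y) acc := by
  induction parts generalizing k acc with
  | nil => simp [getIPv6Loop]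
  | cons p rest ih =>
    simp only [getIPv6Loop]
    rw [if_neg (by omega : ¬ (32 * (k : Int) < 256 - L))]
    simp only [if_pos hacc]
    by_cases hk : k = 7
    · subst hk
      rw [if_pos (by norm_num : (32 * ((7:Nat) : Int) + 32 ≥ 256))]
      have h1 : List.take (8 - 7) (p :: rest) = [p] := rfl
      rw [h1, List.foldl_cons, List.foldl_nil]
    · rw [if_neg (by omega : ¬ (32 * (k : Int) + 32 ≥ 256))]
      have hc : 32 * (k : Int) + 32 = 32 * ((k + 1 : Nat) : Int) := by push_cast; ring
      rw [hc, ih (k + 1) (acc ++ ":" ++ p) (by omega) (by push_cast; omega)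
            (string_append_ne_empty acc p)]
      have ht : 8 - k = (8 - (k + 1)) + 1 := by omega
      rw [ht, List.take_succ_cons, List.foldl_cons]

-- collect phase starting from the empty accumulator
lemma loop_collect (L : Int) (parts : List String) (k : Nat)
    (h8 : k < 8) (hge : 256 - L ≤ 32 * (k : Int)) :
    getIPv6Loop L parts "" (32 * (k : Int)) =
      PySem.Str.join ":" (getIPv6Trim (parts.take (8 - k))) := by
  induction parts generalizing k with
  | nil =>
    rw [List.take_nil]
    rfl
  | cons p rest ih =>
    simp only [getIPv6Loop]
    rw [if_neg (by omega : ¬ (32 * (k : Int) < 256 - L))]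
    simp only [not_true, if_false]
    rw [String.empty_append]
    have ht : 8 - k = (8 - (k + 1)) + 1 := by omega
    rw [ht, List.take_succ_cons]
    by_cases hk : k = 7
    · subst hk
      rw [if_pos (by norm_num : (32 * ((7:Nat) : Int) + 32 ≥ 256))]
      have h0 : 8 - (7 + 1) = 0 := by omega
      rw [h0, List.take_zero]
      by_cases hp : p = ""
      · subst hp
        simp [getIPv6Trim]
        rfl
      · have hb : (p == "") = false := by simpa using hp
        simp only [getIPv6Trim, hb, Bool.false_eq_true, if_false]
        exact (strJoin_singleton p).symm
    · rw [if_neg (by omega : ¬ (32 * (k : Int) + 32 ≥ 256))]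
      have hc : 32 * (k : Int) + 32 = 32 * ((k + 1 : Nat) : Int) := by push_cast; ring
      rw [hc]
      by_cases hp : p = ""
      · subst hp
        rw [ih (k + 1) (by omega) (by push_cast; omega)]
        simp [getIPv6Trim]
      · rw [loop_collect_ne L rest (k + 1) p (by omega) (by push_cast; omega) hp]
        have hb : (p == "") = false := by simpa using hp
        simp only [getIPv6Trim, hb, Bool.false_eq_true, if_false]
        exact (joinCons _ p).symm

-- skip phase: the loop drops the first (skip - k) groups without touching the accumulator
lemma loop_skip (L : Int) (parts : List String) (k : Nat)
    (h : 32 * (k : Int) < 256 - L) :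
    getIPv6Loop L parts "" (32 * (k : Int)) =
      getIPv6Loop L (parts.drop ((ipv6Skip L).toNat - k)) "" (32 * (((ipv6Skip L).toNat : Nat) : Int)) := by
  induction parts generalizing k with
  | nil => simp [getIPv6Loop]
  | cons p rest ih =>
    have hk : k < (ipv6Skip L).toNat := (ipv6Skip_toNat_iff L k).mp h
    simp only [getIPv6Loop]
    rw [if_pos h]
    have hc : 32 * (k : Int) + 32 = 32 * ((k + 1 : Nat) : Int) := by push_cast; ring
    rw [hc]
    by_cases h2 : 32 * ((k + 1 : Nat) : Int) < 256 - L
    · rw [ih (k + 1) h2]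
      have hd : (ipv6Skip L).toNat - k = ((ipv6Skip L).toNat - (k + 1)) + 1 := by omega
      rw [hd, List.drop_succ_cons]
    · have hk1 : (ipv6Skip L).toNat = k + 1 := by
        have := (ipv6Skip_toNat_iff L (k + 1)).not.mp h2
        omega
      rw [hk1]
      have hd : k + 1 - k = 1 := by omega
      rw [hd, List.drop_one, List.tail_cons]

-- past the 8th group with an empty accumulator the loop returns the head group at once
lemma loop_late (L : Int) (parts : List String) (k : Nat)
    (h8 : 8 ≤ k) (hge : 256 - L ≤ 32 * (k : Int)) :
    getIPv6Loop L parts "" (32 * (k : Int)) = parts.getD 0 "" := by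
  cases parts with
  | nil => simp [getIPv6Loop]
  | cons p rest =>
    simp only [getIPv6Loop]
    rw [if_neg (by omega : ¬ (32 * (k : Int) < 256 - L))]
    simp only [not_true, if_false]
    rw [if_pos (by omega : (32 * (k : Int) + 32 ≥ 256))]
    simp [String.empty_append]

-- A's loop against B's closed form, over an arbitrary part list
lemma loop_main (L : Int) (parts : List String)
    (hD : ¬ (L < 32 ∧ parts.getD ((287 - L) / 32).toNat "" ≠ "")) :
    getIPv6Loop L parts "" 0 =
      PySem.Str.join ":" (getIPv6Trim (PySem.List.slice parts (some (ipv6Skip L)) (some 8))) := by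
  have h0 : getIPv6Loop L parts "" 0 = getIPv6Loop L parts "" (32 * ((0 : Nat) : Int)) := by norm_num
  rw [h0, PySem.List.slice_toNat parts (ipv6Skip_nonneg L) (by norm_num : (0:Int) ≤ 8)]
  have h8t : (8 : Int).toNat = 8 := rfl
  rw [h8t]
  by_cases hpos : 0 < ipv6Skip L
  · have hsk : 32 * ((0 : Nat) : Int) < 256 - L := by
      rw [ipv6Skip_iff]; simpa using hpos
    rw [loop_skip L parts 0 hsk]
    have hd0 : (ipv6Skip L).toNat - 0 = (ipv6Skip L).toNat := by omega
    rw [hd0]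
    by_cases h8 : (ipv6Skip L).toNat < 8
    · rw [loop_collect L (parts.drop (ipv6Skip L).toNat) (ipv6Skip L).toNat h8
          (by
            have := (ipv6Skip_toNat_iff L (ipv6Skip L).toNat).not.mpr (by omega)
            omega)]
    · -- skip reaches past the 8th group: both sides are "" (outside D_)
      have htake : 8 - (ipv6Skip L).toNat = 0 := by omega
      rw [htake, List.take_zero]
      by_cases hlen : parts.length ≤ (ipv6Skip L).toNat
      · rw [List.drop_eq_nil_of_le hlen]
        simp only [getIPv6Loop]
        rfl
      · have hL32 : L < 32 := by
          have := (ipv6Skip_toNat_iff L 7).mpr (by omega)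
          omega
        have hskD : ipv6Skip L = (287 - L) / 32 := ipv6Skip_eq_D L hpos
        have hgetD : parts.getD ((287 - L) / 32).toNat "" = "" := by
          by_contra hne
          exact hD ⟨hL32, hne⟩
        rw [loop_late L (parts.drop (ipv6Skip L).toNat) (ipv6Skip L).toNat (by omega)
            (by
              have := (ipv6Skip_toNat_iff L (ipv6Skip L).toNat).not.mpr (by omega)
              omega)]
        have hget : (parts.drop (ipv6Skip L).toNat).getD 0 "" = parts.getD (ipv6Skip L).toNat "" := by
          simp [List.getD_eq_getElem?_getD, List.getElem?_drop]
        rw [hget]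
        have hnat : (ipv6Skip L).toNat = ((287 - L) / 32).toNat := by rw [hskD]
        rw [hnat, hgetD]
        rfl
  · have hsk0 : ipv6Skip L = 0 := le_antisymm (not_lt.mp hpos) (ipv6Skip_nonneg L)
    rw [hsk0]
    have hge : 256 - L ≤ 32 * ((0 : Nat) : Int) := by
      have h1 : ¬ (((0 : Nat) : Int) < ipv6Skip L) := by rw [hsk0]; simp
      have := (ipv6Skip_iff L 0).not.mpr h1
      omega
    rw [loop_collect L parts 0 (by omega) hge]
    simp

-- the change region, on the split part list: A returns the group at the skip index, B returns ""
lemma loop_inside (L : Int) (parts : List String)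
    (hL : L < 32) (_hlen : ((287 - L) / 32) < (parts.length : Int)) :
    getIPv6Loop L parts "" 0 = parts.getD ((287 - L) / 32).toNat "" ∧
      PySem.Str.join ":" (getIPv6Trim (PySem.List.slice parts (some (ipv6Skip L)) (some 8))) = "" := by
  have hpos : 0 < ipv6Skip L := by
    have := (ipv6Skip_iff L 0).mp (by omega)
    simpa using this
  have hskD : ipv6Skip L = (287 - L) / 32 := ipv6Skip_eq_D L hpos
  have h8 : 8 ≤ (ipv6Skip L).toNat := by
    have := (ipv6Skip_toNat_iff L 7).mp (by push_cast; omega)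
    omega
  constructor
  · have h0 : getIPv6Loop L parts "" 0 = getIPv6Loop L parts "" (32 * ((0 : Nat) : Int)) := by norm_num
    rw [h0, loop_skip L parts 0 (by rw [ipv6Skip_iff]; simpa using hpos)]
    have hd0 : (ipv6Skip L).toNat - 0 = (ipv6Skip L).toNat := by omega
    rw [hd0, loop_late L (parts.drop (ipv6Skip L).toNat) (ipv6Skip L).toNat (by omega)
        (by
          have := (ipv6Skip_toNat_iff L (ipv6Skip L).toNat).not.mpr (by omega)
          omega)]
    have hget : (parts.drop (ipv6Skip L).toNat).getD 0 "" = parts.getD (ipv6Skip L).toNat "" := by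
      simp [List.getD_eq_getElem?_getD, List.getElem?_drop]
    rw [hget, hskD]
  · rw [PySem.List.slice_toNat parts (ipv6Skip_nonneg L) (by norm_num : (0:Int) ≤ 8)]
    have htake : (8 : Int).toNat - (ipv6Skip L).toNat = 0 := by
      have h8t : (8 : Int).toNat = 8 := rfl
      omega
    rw [htake, List.take_zero]
    rfl

-- ===== VERDICT (by name: the statement is the Claim_ definition above) =====
theorem getIPv6Interface_spec : Claim_unchanged_getIPv6Interface := by
  intro addr L _ hD
  unfold getIPv6Interface getIPv6Interface_alt
  exact loop_main L _ (by unfold D_getIPv6Interface at hD; exact hD)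

theorem getIPv6Interface_changed : Claim_changed_getIPv6Interface := by
  unfold Claim_changed_getIPv6Interface; decide

theorem getIPv6Interface_tight : Claim_exact_getIPv6Interface := by
  intro addr L _ hD
  unfold D_getIPv6Interface at hD
  obtain ⟨hL, hne⟩ := hD
  have hlen : ((287 - L) / 32) < ((((PySem.Str.split? addr ":").getD []).length : Nat) : Int) := by
    by_contra hge
    exact hne (List.getD_eq_default _ _ (by omega))
  have h := loop_inside L ((PySem.Str.split? addr ":").getD []) hL hlen
  have hA : getIPv6Interface addr L = ((PySem.Str.split? addr ":").getD []).getD ((287 - L) / 32).toNat "" := h.1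
  have hB : getIPv6Interface_alt addr L = "" := h.2
  rw [hA, hB]
  exact hne
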